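-- pv_equiv track=rewrite | github.com/daniel-reich/turbo-robot | 5uMJmbN2uihcyEu75_21.py | weekly_salary
-- ===== SOURCE A (Python) =====
-- def weekly_salary(hours):
--   tally = 0
--
--   for i in range(0,len(hours)):
--     if i >= 0 and i <=4:
--       #weekday
--       if hours[i] <= 8:
--         tally += hours[i]*10
--       else :
--         tally += 8 * 10
--         tally += (hours[i]-8)*15
--     else :
--       #weekend
--       if hours[i] <= 8:
--         tally += hours[i]*20
--       else :
--         tally += 8 * 20
--         tally += (hours[i]-8)*30
--   return tally
-- ===== SOURCE B (Python) =====
-- def weekly_salary(hours):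
--   wd, we = hours[:5], hours[5:]
--   overtime = lambda h: max(h - 8, 0)
--   return (10 * sum(wd) + 5 * sum(map(overtime, wd))
--           + 20 * sum(we) + 10 * sum(map(overtime, we)))
-- ===== Notes on version B (the rewrite author's own statement) =====
-- stated objective: simpler
-- what changed: Replaces A's index-guarded loop with per-day branches by a branch-free algebraic formula: pay = rate*hours + (rate/2)*max(hours-8,0), computed as four aggregate sums over the weekday (hours[:5]) and weekend (hours[5:]) slices.
import Mathlib
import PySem

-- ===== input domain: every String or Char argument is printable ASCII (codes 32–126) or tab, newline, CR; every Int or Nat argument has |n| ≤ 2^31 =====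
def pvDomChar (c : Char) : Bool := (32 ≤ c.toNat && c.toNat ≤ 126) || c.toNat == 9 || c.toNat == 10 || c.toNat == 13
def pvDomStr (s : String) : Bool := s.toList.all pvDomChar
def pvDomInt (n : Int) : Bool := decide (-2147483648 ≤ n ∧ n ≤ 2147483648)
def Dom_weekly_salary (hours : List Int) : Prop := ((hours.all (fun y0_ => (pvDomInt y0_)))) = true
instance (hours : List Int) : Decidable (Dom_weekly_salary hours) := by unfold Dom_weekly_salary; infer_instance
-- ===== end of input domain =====

-- B replaces A's per-day branching loop by the branch-free aggregate formula rate*h + (rate/2)*max(h-8,0) summed over the weekday/weekend slices (simpler, same cost).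


-- ===== PORT A =====
def weekly_salary (hours : List Int) : Int :=
  (PySem.List.pyRange 0 (hours.length : Int) 1).foldl
    (fun tally i =>
      if 0 ≤ i ∧ i ≤ 4 then
        -- weekday
        if PySem.List.pyGetD hours i 0 ≤ 8 then
          tally + PySem.List.pyGetD hours i 0 * 10
        else
          tally + 8 * 10 + (PySem.List.pyGetD hours i 0 - 8) * 15
      else
        -- weekend
        if PySem.List.pyGetD hours i 0 ≤ 8 then
          tally + PySem.List.pyGetD hours i 0 * 20
        else
          tally + 8 * 20 + (PySem.List.pyGetD hours i 0 - 8) * 30)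
    0

-- ===== PORT B =====
def overtime (h : Int) : Int := max (h - 8) 0

def weekly_salary_alt (hours : List Int) : Int :=
  let wd := PySem.List.slice hours none (some 5)
  let we := PySem.List.slice hours (some 5) none
  10 * wd.sum + 5 * (wd.map overtime).sum
  + 20 * we.sum + 10 * (we.map overtime).sum

-- ===== PRECONDITION & SPEC =====
def Spec_weekly_salary (hours : List Int) (out : Int) : Prop := out = weekly_salary_alt hours
instance (hours : List Int) (out : Int) : Decidable (Spec_weekly_salary hours out) := by unfold Spec_weekly_salary; infer_instance

-- ===== CLAIM (what is proved, stated in full; the proofs are below) =====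
def Claim_equal_weekly_salary : Prop := ∀ (hours : List Int), Dom_weekly_salary hours → Spec_weekly_salary hours (weekly_salary hours)

-- ===== LEMMAS AND PROOFS =====

theorem alt_take_drop (hours : List Int) :
    weekly_salary_alt hours =
      10 * (hours.take 5).sum + 5 * ((hours.take 5).map overtime).sum
      + 20 * (hours.drop 5).sum + 10 * ((hours.drop 5).map overtime).sum := by
  unfold weekly_salary_alt
  rw [show (5 : Int) = ((5 : Nat) : Int) from rfl,
      PySem.List.slice_to_natCast, PySem.List.slice_from_natCast]

theorem pyGetD_append_lt (xs : List Int) (x : Int) (i : Int)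
    (h0 : 0 ≤ i) (h1 : i < (xs.length : Int)) :
    PySem.List.pyGetD (xs ++ [x]) i 0 = PySem.List.pyGetD xs i 0 := by
  rw [PySem.List.pyGetD_eq_getElem _ _ h0 (by simp; omega),
      PySem.List.pyGetD_eq_getElem _ _ h0 h1,
      List.getElem_append_left (by omega)]

theorem pyGetD_append_last (xs : List Int) (x : Int) :
    PySem.List.pyGetD (xs ++ [x]) (xs.length : Int) 0 = x := by
  rw [PySem.List.pyGetD_eq_getElem _ _ (by positivity) (by simp)]
  simp

theorem weekly_eq (hours : List Int) : weekly_salary hours = weekly_salary_alt hours := by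
  induction hours using List.reverseRecOn with
  | nil => decide
  | append_singleton xs x ih =>
    unfold weekly_salary
    rw [show ((xs ++ [x]).length : Int) = (xs.length : Int) + 1 by simp,
        PySem.List.pyRange_one_succ_right (by positivity), List.foldl_append]
    have hinner :
        List.foldl
          (fun tally i =>
            if 0 ≤ i ∧ i ≤ 4 then
              if PySem.List.pyGetD (xs ++ [x]) i 0 ≤ 8 then
                tally + PySem.List.pyGetD (xs ++ [x]) i 0 * 10
              else
                tally + 8 * 10 + (PySem.List.pyGetD (xs ++ [x]) i 0 - 8) * 15
            else
              if PySem.List.pyGetD (xs ++ [x]) i 0 ≤ 8 then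
                tally + PySem.List.pyGetD (xs ++ [x]) i 0 * 20
              else
                tally + 8 * 20 + (PySem.List.pyGetD (xs ++ [x]) i 0 - 8) * 30)
          0 (PySem.List.pyRange 0 (xs.length : Int))
        = weekly_salary_alt xs := by
      rw [← ih]
      unfold weekly_salary
      apply PySem.List.foldl_congr_mem
      intro acc i hi
      rw [PySem.List.mem_pyRange_one] at hi
      rw [pyGetD_append_lt xs x i hi.1 hi.2]
    rw [hinner]
    simp only [List.foldl_cons, List.foldl_nil, pyGetD_append_last]
    rw [alt_take_drop, alt_take_drop, List.take_append, List.drop_append]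
    by_cases h5 : xs.length ≤ 4
    · rw [if_pos ⟨by positivity, by omega⟩]
      rw [List.take_of_length_le (by omega),
          List.drop_eq_nil_of_le (le_refl _ |>.trans (by omega)),
          show [x].take (5 - xs.length) = [x] by
            cases h : 5 - xs.length with
            | zero => omega
            | succ n => simp,
          show [x].drop (5 - xs.length) = [] by
            cases h : 5 - xs.length with
            | zero => omega
            | succ n => simp]
      simp only [List.map_append, List.sum_append, List.map_cons, List.map_nil,
        List.sum_cons, List.sum_nil, overtime]
      split_ifs <;> omega
    · rw [if_neg (by omega)]
      rw [show 5 - xs.length = 0 by omega]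
      simp only [List.take_zero, List.drop_zero, List.append_nil,
        List.map_append, List.sum_append, List.map_cons, List.map_nil,
        List.sum_cons, List.sum_nil, overtime]
      split_ifs <;> omega

-- ===== VERDICT (by name: the statement is the Claim_ definition above) =====
theorem weekly_salary_spec : Claim_equal_weekly_salary := by
  intro hours _
  unfold Spec_weekly_salary
  exact weekly_eq hours
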